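-- pv_equiv track=rewrite | github.com/yougi8/CodingTestStudy | 프로그래머스/pccp_1_1_외톨이알파벳.py | solution
-- ===== SOURCE A (Python) =====
-- def solution(input_string):
--     exist = []
--     answer = []
--
--     #     exist.append(input_string[0])
--
--     #     for i in range(1,len(input_string)-1):
--     #         if input_string[i+1] in exist and input_string[i]!=input_string[i+1]:
--     #             answer.append(input_string[i+1])
--     #         exist.append(input_string[i])
--
--     for i in range(len(input_string) - 1):
--         if input_string[i] in exist:
--             answer.append(input_string[i])
--         else:
--             if input_string[i] != input_string[i + 1]:
--                 exist.append(input_string[i])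
--     if input_string[-1] in exist:
--         answer.append(input_string[-1])
--
--     if len(answer) == 0:
--         return 'N'
--     new = list(set(answer))
--     new.sort()
--     result = ''.join(new)
--     return result
-- ===== SOURCE B (Python) =====
-- def solution(input_string):
--     # One pass: count, per letter, how many maximal runs (blocks) start with it.
--     blocks = {}
--     prev = None
--     for ch in input_string:
--         if ch != prev:
--             blocks[ch] = blocks.get(ch, 0) + 1
--             prev = ch
--     lonely = sorted(c for c in blocks if blocks[c] >= 2)
--     return ''.join(lonely) if lonely else 'N'
-- ===== Notes on version B (the rewrite author's own statement) =====
-- stated objective: simpler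
-- what changed: Instead of A's index loop with lookahead maintaining a seen-letters list (linear membership scans) plus a separate last-character step and a set/sort postpass, B makes one pass counting how many maximal runs each letter starts in a dict and returns the sorted letters with run count >= 2.
import Mathlib
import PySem

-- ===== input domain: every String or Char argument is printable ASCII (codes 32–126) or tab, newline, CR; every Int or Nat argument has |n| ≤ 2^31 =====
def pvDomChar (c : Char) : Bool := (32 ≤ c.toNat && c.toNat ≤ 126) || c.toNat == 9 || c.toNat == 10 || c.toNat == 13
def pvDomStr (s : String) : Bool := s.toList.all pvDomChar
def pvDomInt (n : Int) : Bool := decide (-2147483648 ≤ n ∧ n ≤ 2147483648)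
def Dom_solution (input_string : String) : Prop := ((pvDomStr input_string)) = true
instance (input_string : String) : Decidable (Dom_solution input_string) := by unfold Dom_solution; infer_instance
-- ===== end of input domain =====

-- B replaces A's index-with-lookahead loop + set/sort postpass by one
-- pass counting run starts per letter in a dict; objective: simpler.
-- Pre_ excludes only the empty string, on which A raises IndexError (input_string[-1]).

-- ===== PORT A =====
def stepA (s : List Char) (st : List Char × List Char) (i : Int) : List Char × List Char :=
  if PySem.List.pyGetD s i ' ' ∈ st.1 then (st.1, st.2 ++ [PySem.List.pyGetD s i ' '])
  else if PySem.List.pyGetD s i ' ' ≠ PySem.List.pyGetD s (i + 1) ' ' then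
    (st.1 ++ [PySem.List.pyGetD s i ' '], st.2)
  else st

def solution (input_string : String) : String :=
  let s := input_string.toList
  let st := (PySem.List.pyRange 0 (PySem.Str.len input_string - 1) 1).foldl (stepA s) ([], [])
  let answer := if PySem.List.pyGetD s (-1) ' ' ∈ st.1 then st.2 ++ [PySem.List.pyGetD s (-1) ' '] else st.2
  if answer.length = 0 then "N"
  else String.ofList (PySem.List.sorted (PySem.Set.ofList answer) (fun c => c) false)

-- ===== PORT B =====
def stepB (st : PySem.Dict Char Int × Option Char) (ch : Char) : PySem.Dict Char Int × Option Char :=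
  if some ch ≠ st.2 then (st.1.insert ch (st.1.getD ch 0 + 1), some ch) else st

def solution_alt (input_string : String) : String :=
  let blocks := (input_string.toList.foldl stepB (PySem.Dict.empty, none)).1
  let lonely := PySem.List.sorted (blocks.keys.filter (fun c => 2 ≤ blocks.getD c 0)) (fun c => c) false
  if lonely ≠ [] then String.ofList lonely else "N"

-- ===== PRECONDITION & SPEC =====
-- Pre_ excludes exactly the empty string: there A raises IndexError at input_string[-1].
def Pre_solution (input_string : String) : Prop := input_string ≠ ""
instance (input_string : String) : Decidable (Pre_solution input_string) := by unfold Pre_solution; infer_instance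
def pvWitness_solution : String := "aabaa"

def Spec_solution (input_string : String) (out : String) : Prop := out = solution_alt input_string
instance (input_string : String) (out : String) : Decidable (Spec_solution input_string out) := by unfold Spec_solution; infer_instance

-- ===== CLAIM (what is proved, stated in full; the proofs are below) =====
def Claim_equal_solution : Prop := ∀ (input_string : String), Dom_solution input_string → Pre_solution input_string → Spec_solution input_string (solution input_string)

-- ===== LEMMAS AND PROOFS =====

-- run keys of a string (first letter of every maximal block)
def keysOf : List Char → List Char
  | [] => []
  | [a] => [a]
  | a :: b :: t => if a = b then keysOf (b :: t) else a :: keysOf (b :: t)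

-- run keys still to be counted by B's loop, given the previous character
def keysP (p : Option Char) : List Char → List Char
  | [] => []
  | a :: t => if some a = p then keysP p t else a :: keysP (some a) t

-- A's loop (including the final s[-1] step), as structural recursion
def gA (exist answer : List Char) : List Char → List Char
  | [] => answer
  | [c] => if c ∈ exist then answer ++ [c] else answer
  | a :: b :: t =>
    if a ∈ exist then gA exist (answer ++ [a]) (b :: t)
    else if a ≠ b then gA (exist ++ [a]) answer (b :: t)
    else gA exist answer (b :: t)

theorem mem_keysOf (c : Char) : ∀ (l : List Char), c ∈ keysOf l ↔ c ∈ l := by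
  intro l
  induction l with
  | nil => simp [keysOf]
  | cons a t ih =>
    cases t with
    | nil => simp [keysOf]
    | cons b u =>
      by_cases h : a = b
      · subst h; simp [keysOf]; simpa using ih
      · simp [keysOf, h, ih]

theorem keysP_some_eq (a : Char) : ∀ (l : List Char), a :: keysP (some a) l = keysOf (a :: l) := by
  intro l
  induction l generalizing a with
  | nil => simp [keysP, keysOf]
  | cons b t ih =>
    by_cases h : b = a
    · subst h
      simpa [keysP, keysOf] using ih b
    · have h' : ¬ (some b = some a) := by simpa using h
      have h'' : ¬ (a = b) := fun e => h e.symm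
      simp only [keysP, keysOf, if_neg h', if_neg h'']
      rw [← ih b]

theorem keysP_none_eq (l : List Char) : keysP none l = keysOf l := by
  cases l with
  | nil => rfl
  | cons a t => simpa [keysP] using keysP_some_eq a t

-- membership in A's loop result
theorem mem_gA (c : Char) : ∀ (rest : List Char), rest ≠ [] → ∀ (exist answer : List Char),
    (c ∈ gA exist answer rest ↔
      c ∈ answer ∨ (c ∈ exist ∧ c ∈ rest) ∨ (c ∉ exist ∧ 2 ≤ (keysOf rest).count c)) := by
  intro rest
  induction rest with
  | nil => intro h; exact absurd rfl h
  | cons a t ih =>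
    intro _ exist answer
    cases t with
    | nil =>
      by_cases h : a ∈ exist <;> by_cases hc : c = a <;>
        simp [gA, h, hc, keysOf, List.count_cons] <;>
        first
        | tauto
        | (intro _ h2; rw [if_neg fun e => hc e.symm] at h2; omega)
    | cons b u =>
      have hne : (b :: u) ≠ [] := by simp
      by_cases h : a ∈ exist
      · rw [show gA exist answer (a :: b :: u) = gA exist (answer ++ [a]) (b :: u) by
          simp [gA, h]]
        rw [ih hne exist (answer ++ [a])]
        by_cases hc : c = a
        · subst hc
          simp [h]
        · have hcent : (keysOf (a :: b :: u)).count c = (keysOf (b :: u)).count c := by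
            by_cases hab : a = b
            · simp [keysOf, hab]
            · rw [show keysOf (a :: b :: u) = a :: keysOf (b :: u) by simp [keysOf, hab]]
              simp [show ¬ a = c from fun e => hc e.symm]
          simp [hc, hcent]
      · by_cases hab : a = b
        · rw [show gA exist answer (a :: b :: u) = gA exist answer (b :: u) by
            subst hab; simp [gA, h]]
          rw [ih hne exist answer]
          have hk : keysOf (a :: b :: u) = keysOf (b :: u) := by simp [keysOf, hab]
          rw [hk]
          by_cases hc : c = a
          · subst hc; subst hab; simp [h]
          · simp [hc]
        · rw [show gA exist answer (a :: b :: u) = gA (exist ++ [a]) answer (b :: u) by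
            simp [gA, h, hab]]
          rw [ih hne (exist ++ [a]) answer]
          have hk : keysOf (a :: b :: u) = a :: keysOf (b :: u) := by simp [keysOf, hab]
          rw [hk]
          by_cases hc : c = a
          · subst hc
            simp [h, mem_keysOf]
          · have h2 : (a :: keysOf (b :: u)).count c = (keysOf (b :: u)).count c := by
              simp [show ¬ a = c from fun e => hc e.symm]
            simp [hc, h2]

-- A's indexed fold (plus the final s[-1] step) equals gA, from any start index
theorem foldA_from (s : List Char) : ∀ (k j : Nat), j < s.length → k = s.length - 1 - j →
    ∀ (exist answer : List Char),
    (let st := (PySem.List.pyRange (j : Int) ((s.length : Int) - 1) 1).foldl (stepA s) (exist, answer)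
     if PySem.List.pyGetD s (-1) ' ' ∈ st.1 then st.2 ++ [PySem.List.pyGetD s (-1) ' '] else st.2)
    = gA exist answer (s.drop j) := by
  intro k
  induction k with
  | zero =>
    intro j hj hk exist answer
    have hj' : j = s.length - 1 := by omega
    have hrange : PySem.List.pyRange (j : Int) ((s.length : Int) - 1) 1 = [] :=
      PySem.List.pyRange_one_eq_nil (by omega)
    have hs : s ≠ [] := by intro h; subst h; simp at hj
    have hdrop : s.drop j = [s.getLast hs] := by
      rw [List.drop_eq_getElem_cons (by omega)]
      rw [List.drop_eq_nil_of_le (by omega)]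
      congr 1
      rw [List.getLast_eq_getElem]
      congr 1
    simp only [hrange, List.foldl_nil, hdrop, gA]
    all_goals rw [PySem.List.pyGetD_neg_one s ' ' hs]
  | succ k ih =>
    intro j hj hk exist answer
    have hj1 : j + 1 < s.length := by omega
    have hrange : PySem.List.pyRange (j : Int) ((s.length : Int) - 1) 1
        = (j : Int) :: PySem.List.pyRange ((j : Int) + 1) ((s.length : Int) - 1) 1 :=
      PySem.List.pyRange_one_cons (by omega)
    have hgj : PySem.List.pyGetD s (j : Int) ' ' = s[j] := by
      rw [PySem.List.pyGetD_natCast]; exact List.getD_eq_getElem _ _ hj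
    have hgj1 : PySem.List.pyGetD s ((j : Int) + 1) ' ' = s[j + 1] := by
      rw [show ((j : Int) + 1) = ((j + 1 : Nat) : Int) by push_cast; ring]
      rw [PySem.List.pyGetD_natCast]; exact List.getD_eq_getElem _ _ hj1
    have hdrop : s.drop j = s[j] :: s[j + 1] :: s.drop (j + 2) := by
      rw [List.drop_eq_getElem_cons hj, List.drop_eq_getElem_cons hj1]
    have hcast : ((j : Int) + 1) = ((j + 1 : Nat) : Int) := by push_cast; ring
    have ih' := ih (j + 1) hj1 (by omega)
    rw [hrange]
    simp only [List.foldl_cons]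
    rw [hdrop]
    by_cases h1 : s[j] ∈ exist
    · rw [show stepA s (exist, answer) (j : Int) = (exist, answer ++ [s[j]]) by
        simp [stepA, hgj, h1]]
      rw [show gA exist answer (s[j] :: s[j + 1] :: s.drop (j + 2)) =
          gA exist (answer ++ [s[j]]) (s[j + 1] :: s.drop (j + 2)) by simp [gA, h1]]
      rw [← List.drop_eq_getElem_cons hj1, hcast]
      exact ih' exist (answer ++ [s[j]])
    · by_cases h2 : s[j] = s[j + 1]
      · rw [show stepA s (exist, answer) (j : Int) = (exist, answer) by
          simp only [stepA, hgj, hgj1]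
          rw [if_neg h1, if_neg (by simp [h2])]]
        rw [show gA exist answer (s[j] :: s[j + 1] :: s.drop (j + 2)) =
            gA exist answer (s[j + 1] :: s.drop (j + 2)) by
          simp only [gA]
          rw [if_neg h1, if_neg (by simp [h2])]]
        rw [← List.drop_eq_getElem_cons hj1, hcast]
        exact ih' exist answer
      · rw [show stepA s (exist, answer) (j : Int) = (exist ++ [s[j]], answer) by
          simp only [stepA, hgj, hgj1]
          rw [if_neg h1, if_pos h2]]
        rw [show gA exist answer (s[j] :: s[j + 1] :: s.drop (j + 2)) =
            gA (exist ++ [s[j]]) answer (s[j + 1] :: s.drop (j + 2)) by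
          simp only [gA]
          rw [if_neg h1, if_pos h2]]
        rw [← List.drop_eq_getElem_cons hj1, hcast]
        exact ih' (exist ++ [s[j]]) answer

theorem foldA_eq (s : List Char) (hs : s ≠ []) :
    (let st := (PySem.List.pyRange 0 ((s.length : Int) - 1) 1).foldl (stepA s) ([], [])
     if PySem.List.pyGetD s (-1) ' ' ∈ st.1 then st.2 ++ [PySem.List.pyGetD s (-1) ' '] else st.2)
    = gA [] [] s := by
  have h0 : 0 < s.length := List.length_pos_iff.mpr hs
  have := foldA_from s (s.length - 1) 0 h0 (by omega) [] []
  simpa using this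

-- B's fold computes the counter of the remaining run keys
theorem foldB_eq : ∀ (l : List Char) (d : PySem.Dict Char Int) (p : Option Char),
    (l.foldl stepB (d, p)).1 = (keysP p l).foldl (fun d x => d.insert x (d.getD x 0 + 1)) d := by
  intro l
  induction l with
  | nil => intro d p; rfl
  | cons a t ih =>
    intro d p
    by_cases h : some a = p
    · simp [stepB, h, keysP, ih]
    · simp [stepB, h, keysP, ih]

-- the two final candidate lists agree as sets, hence their sorts agree
theorem main_eq (l : List Char) (hl : l ≠ []) :
    (if (gA [] [] l).length = 0 then "N"
     else String.ofList (PySem.List.sorted (PySem.Set.ofList (gA [] [] l)) (fun c => c) false))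
    = (if PySem.List.sorted
          (((PySem.Dict.counter (keysOf l)).keys).filter
            (fun c => 2 ≤ (PySem.Dict.counter (keysOf l)).getD c 0)) (fun c => c) false ≠ [] then
        String.ofList (PySem.List.sorted
          (((PySem.Dict.counter (keysOf l)).keys).filter
            (fun c => 2 ≤ (PySem.Dict.counter (keysOf l)).getD c 0)) (fun c => c) false)
      else "N") := by
  have hfilter : ((PySem.Dict.counter (keysOf l)).keys).filter
        (fun c => 2 ≤ (PySem.Dict.counter (keysOf l)).getD c 0)
      = (PySem.Set.ofList (keysOf l)).filter (fun c => 2 ≤ ((keysOf l).count c : Int)) := by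
    rw [PySem.Dict.keys_counter]
    apply List.filter_congr
    intro c _
    rw [PySem.Dict.getD_counter]
  rw [hfilter]
  have hmemA : ∀ c, c ∈ PySem.Set.ofList (gA [] [] l) ↔ 2 ≤ (keysOf l).count c := by
    intro c
    rw [PySem.Set.mem_ofList, mem_gA c l hl [] []]
    simp
  have hmemB : ∀ c, c ∈ (PySem.Set.ofList (keysOf l)).filter
      (fun c => 2 ≤ ((keysOf l).count c : Int)) ↔ 2 ≤ (keysOf l).count c := by
    intro c
    rw [List.mem_filter, PySem.Set.mem_ofList]
    constructor
    · intro ⟨_, h2⟩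
      have : (2 : Int) ≤ ((keysOf l).count c : Int) := by simpa using h2
      exact_mod_cast this
    · intro h2
      refine ⟨List.count_pos_iff.mp (by omega), by simpa using (by exact_mod_cast h2 : (2 : Int) ≤ ((keysOf l).count c : Int))⟩
  have hperm : (PySem.Set.ofList (gA [] [] l)).Perm
      ((PySem.Set.ofList (keysOf l)).filter (fun c => 2 ≤ ((keysOf l).count c : Int))) := by
    rw [List.perm_ext_iff_of_nodup (PySem.Set.nodup_ofList _)
      ((PySem.Set.nodup_ofList _).filter _)]
    intro c
    rw [hmemA, hmemB]
  have hsort : PySem.List.sorted (PySem.Set.ofList (gA [] [] l)) (fun c => c) false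
      = PySem.List.sorted ((PySem.Set.ofList (keysOf l)).filter
          (fun c => 2 ≤ ((keysOf l).count c : Int))) (fun c => c) false :=
    PySem.List.sorted_eq_sorted_of_perm _ _ _ (fun _ _ h => h) hperm
  by_cases hg : gA [] [] l = []
  · have hBnil : (PySem.Set.ofList (keysOf l)).filter
        (fun c => 2 ≤ ((keysOf l).count c : Int)) = [] := by
      have := hperm
      rw [hg] at this
      exact (this.nil_eq).symm
    rw [if_pos (by simp [hg]), if_neg (by rw [not_ne_iff, PySem.List.sorted_eq_nil_iff]; exact hBnil)]
  · have hAnil : PySem.Set.ofList (gA [] [] l) ≠ [] := by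
      intro he
      obtain ⟨c, hc⟩ := List.exists_mem_of_ne_nil _ hg
      have hm := (PySem.Set.mem_ofList (gA [] [] l) c).mpr hc
      rw [he] at hm
      simp at hm
    have hBne : (PySem.Set.ofList (keysOf l)).filter
        (fun c => 2 ≤ ((keysOf l).count c : Int)) ≠ [] := by
      intro he
      rw [he] at hperm
      exact hAnil hperm.eq_nil
    rw [if_neg (by simpa [List.length_eq_zero_iff] using hg)]
    rw [if_pos (by simpa [PySem.List.sorted_eq_nil_iff] using hBne)]
    rw [hsort]

-- ===== VERDICT (by name: the statement is the Claim_ definition above) =====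
theorem solution_spec : Claim_equal_solution := by
  intro s hdom hpre
  unfold Spec_solution
  have hl : s.toList ≠ [] := by simpa [String.toList_eq_nil_iff] using hpre
  simp only [solution, solution_alt, PySem.Str.len_eq]
  rw [foldA_eq s.toList hl]
  rw [foldB_eq, keysP_none_eq, PySem.Dict.foldl_insert_getD_add_one_eq_counter]
  exact main_eq s.toList hl
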